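-- pv_equiv track=rewrite | github.com/pbhandar2/mascots | mascots/traceAnalysis/rdHist.py | filter_rdhist_write_around
-- ===== SOURCE A (Python) =====
-- def filter_rdhist_write_around(rdhist):
--     zero_entry_count = 0
--     rdhist_length = len(rdhist)
--
--     # start reading from the end of the histogram
--     for i in range(rdhist_length-1, 1, -1):
--
--         # if both read and write count of the current bin is zero then update counter else break
--         if rdhist[i] == 0:
--             zero_entry_count += 1
--         else:
--             break
--
--     return rdhist[0:rdhist_length-zero_entry_count]
-- ===== SOURCE B (Python) =====
-- def filter_rdhist_write_around(rdhist):
--     # single forward pass: find the last nonzero index (indices 0 and 1 are always kept)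
--     last_nonzero = 1
--     for i in range(len(rdhist)):
--         if rdhist[i] != 0:
--             last_nonzero = max(last_nonzero, i)
--     return rdhist[0:last_nonzero + 1]
-- ===== Notes on version B (the rewrite author's own statement) =====
-- stated objective: alternative
-- what changed: Replaces the backward break-loop that counts trailing zeros (and the subtraction length formula) with a single forward scan tracking the last nonzero index, returning one final slice.
import Mathlib
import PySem

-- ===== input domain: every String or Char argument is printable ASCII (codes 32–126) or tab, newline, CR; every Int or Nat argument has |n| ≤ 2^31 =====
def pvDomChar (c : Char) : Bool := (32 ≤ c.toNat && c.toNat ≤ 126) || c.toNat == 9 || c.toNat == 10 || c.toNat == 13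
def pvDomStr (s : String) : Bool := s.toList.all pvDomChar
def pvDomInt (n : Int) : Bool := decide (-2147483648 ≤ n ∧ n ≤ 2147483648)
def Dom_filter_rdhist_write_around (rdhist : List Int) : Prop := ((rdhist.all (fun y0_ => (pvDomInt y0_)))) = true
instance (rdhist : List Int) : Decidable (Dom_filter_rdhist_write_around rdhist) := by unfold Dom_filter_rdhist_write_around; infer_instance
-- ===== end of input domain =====

-- B replaces A's backward break-loop counting trailing zeros with a single forward
-- scan for the last nonzero index and one final slice (alternative decomposition).

-- ===== PORT A =====
-- A's loop body: fold state is (zero_entry_count, broken); 'broken' models the break.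
def pvAstep (rdhist : List Int) (st : Int × Bool) (i : Int) : Int × Bool :=
  if st.2 then st
  else if PySem.List.pyGetD rdhist i 0 = 0 then (st.1 + 1, st.2) else (st.1, true)

def filter_rdhist_write_around (rdhist : List Int) : List Int :=
  let rdhist_length : Int := rdhist.length
  let st := (PySem.List.pyRange (rdhist_length - 1) 1 (-1)).foldl (pvAstep rdhist) (0, false)
  PySem.List.slice rdhist (some 0) (some (rdhist_length - st.1))

-- ===== PORT B =====
-- B's loop body: keep the largest index holding a nonzero value (seeded with 1).
def pvBstep (rdhist : List Int) (last : Int) (i : Int) : Int :=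
  if PySem.List.pyGetD rdhist i 0 ≠ 0 then max last i else last

def filter_rdhist_write_around_alt (rdhist : List Int) : List Int :=
  let last := (PySem.List.pyRange 0 (rdhist.length : Int) 1).foldl (pvBstep rdhist) 1
  PySem.List.slice rdhist (some 0) (some (last + 1))

-- ===== PRECONDITION & SPEC =====
def Spec_filter_rdhist_write_around (rdhist : List Int) (out : List Int) : Prop := out = filter_rdhist_write_around_alt rdhist
instance (rdhist : List Int) (out : List Int) : Decidable (Spec_filter_rdhist_write_around rdhist out) := by unfold Spec_filter_rdhist_write_around; infer_instance

-- ===== CLAIM (what is proved, stated in full; the proofs are below) =====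
def Claim_equal_filter_rdhist_write_around : Prop := ∀ (rdhist : List Int), Dom_filter_rdhist_write_around rdhist → Spec_filter_rdhist_write_around rdhist (filter_rdhist_write_around rdhist)

-- ===== LEMMAS AND PROOFS =====

-- A's loop result and B's loop result, named for the proofs.
def pvStA (l : List Int) : Int × Bool :=
  (PySem.List.pyRange ((l.length : Int) - 1) 1 (-1)).foldl (pvAstep l) (0, false)

def pvGB (l : List Int) : Int :=
  (PySem.List.pyRange 0 (l.length : Int) 1).foldl (pvBstep l) 1

-- once broken, A's fold is constant
lemma pvAstep_absorb (l : List Int) : ∀ (ris : List Int) (c : Int),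
    ris.foldl (pvAstep l) (c, true) = (c, true) := by
  intro ris
  induction ris with
  | nil => intro c; rfl
  | cons r rs ih => intro c; simpa [pvAstep] using ih c

-- unbroken init count is an additive offset
lemma pvAstep_shift (l : List Int) : ∀ (ris : List Int) (c : Int),
    ris.foldl (pvAstep l) (c, false) =
      (c + (ris.foldl (pvAstep l) (0, false)).1, (ris.foldl (pvAstep l) (0, false)).2) := by
  intro ris
  induction ris with
  | nil => intro c; simp
  | cons r rs ih =>
    intro c
    by_cases hz : PySem.List.pyGetD l r 0 = 0
    · simp only [List.foldl_cons, pvAstep, hz, if_true, if_false, Bool.false_eq_true]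
      rw [ih (c + 1), ih (0 + 1)]
      simp [Prod.ext_iff]
      ring
    · simp only [List.foldl_cons, pvAstep, hz, if_false, Bool.false_eq_true]
      rw [pvAstep_absorb, pvAstep_absorb]
      simp

lemma pvGetD_concat_lt (l : List Int) (x : Int) {i : Int} (h1 : 0 ≤ i)
    (h2 : i < (l.length : Int)) :
    PySem.List.pyGetD (l ++ [x]) i 0 = PySem.List.pyGetD l i 0 := by
  rw [PySem.List.pyGetD_eq_getElem _ _ h1 (by simp; omega),
      PySem.List.pyGetD_eq_getElem _ _ h1 h2]
  exact List.getElem_append_left (by omega)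

lemma pvGetD_concat_len (l : List Int) (x : Int) :
    PySem.List.pyGetD (l ++ [x]) (l.length : Int) 0 = x := by
  rw [PySem.List.pyGetD_eq_getElem _ _ (by positivity) (by simp)]
  simp

lemma pvStA_concat (l : List Int) (x : Int) :
    pvStA (l ++ [x]) =
      if l.length ≤ 1 then (0, false)
      else if x = 0 then ((pvStA l).1 + 1, (pvStA l).2) else (0, true) := by
  unfold pvStA
  have hlen : ((l ++ [x]).length : Int) - 1 = (l.length : Int) := by simp
  rw [hlen]
  by_cases hn : l.length ≤ 1
  · rw [if_pos hn, PySem.List.pyRange_neg_one_eq_nil (by exact_mod_cast hn)]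
    rfl
  · rw [if_neg hn, PySem.List.pyRange_neg_one_cons (by exact_mod_cast Nat.lt_of_not_le hn)]
    rw [List.foldl_cons]
    have hcongr : ∀ (init : Int × Bool),
        (PySem.List.pyRange ((l.length : Int) - 1) 1 (-1)).foldl (pvAstep (l ++ [x])) init =
        (PySem.List.pyRange ((l.length : Int) - 1) 1 (-1)).foldl (pvAstep l) init := by
      intro init
      refine PySem.List.foldl_congr_mem _ _ _ _ (fun acc i hi => ?_)
      rw [PySem.List.mem_pyRange_neg_one] at hi
      unfold pvAstep
      rw [pvGetD_concat_lt l x (show (0:Int) ≤ i by omega) (show i < (l.length:Int) by omega)]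
    by_cases hx : x = 0
    · rw [if_pos hx]
      have hstep : pvAstep (l ++ [x]) (0, false) (l.length : Int) = (1, false) := by
        simp [pvAstep, hx]
      rw [hstep, hcongr, pvAstep_shift]
      refine Prod.ext (by simp; ring) (by simp)
    · rw [if_neg hx]
      have hstep : pvAstep (l ++ [x]) (0, false) (l.length : Int) = (0, true) := by
        simp [pvAstep, hx, pvGetD_concat_len l x]
      rw [hstep]
      exact pvAstep_absorb (l ++ [x]) _ 0

lemma pvGB_concat (l : List Int) (x : Int) :
    pvGB (l ++ [x]) = if x ≠ 0 then max (pvGB l) (l.length : Int) else pvGB l := by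
  unfold pvGB
  have hlen : ((l ++ [x]).length : Int) = (l.length : Int) + 1 := by simp
  rw [hlen, PySem.List.pyRange_one_succ_right (by positivity), List.foldl_append]
  have hcongr :
      (PySem.List.pyRange 0 (l.length : Int) 1).foldl (pvBstep (l ++ [x])) 1 =
      (PySem.List.pyRange 0 (l.length : Int) 1).foldl (pvBstep l) 1 := by
    refine PySem.List.foldl_congr_mem _ _ _ _ (fun acc i hi => ?_)
    rw [PySem.List.mem_pyRange_one] at hi
    simp only [pvBstep, pvGetD_concat_lt l x hi.1 hi.2]
  rw [List.foldl_cons, List.foldl_nil, hcongr]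
  simp only [pvBstep, pvGetD_concat_len]

lemma pvKey : ∀ l : List Int,
    0 ≤ (pvStA l).1 ∧ 1 ≤ pvGB l ∧
      (if l.length ≤ 1 then (pvStA l).1 = 0 ∧ pvGB l = 1
       else (l.length : Int) - (pvStA l).1 = pvGB l + 1) := by
  intro l
  induction l using List.reverseRecOn with
  | nil =>
    refine ⟨?_, ?_, ?_⟩ <;> simp [pvStA, pvGB]
  | append_singleton l x ih =>
    obtain ⟨ihz, ihg, ihmain⟩ := ih
    rw [pvStA_concat, pvGB_concat]
    simp only [List.length_append, List.length_singleton, Nat.cast_add, Nat.cast_one]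
    split_ifs at ihmain ⊢ <;> simp_all <;> first | omega | (have hpos : 0 < l.length := List.length_pos_iff.mpr (by assumption); omega)

-- ===== VERDICT (by name: the statement is the Claim_ definition above) =====
theorem filter_rdhist_write_around_spec : Claim_equal_filter_rdhist_write_around := by
  intro l _
  unfold Spec_filter_rdhist_write_around filter_rdhist_write_around filter_rdhist_write_around_alt
  obtain ⟨hz, hg, hmain⟩ := pvKey l
  show PySem.List.slice l (some 0) (some ((l.length : Int) - (pvStA l).1)) =
       PySem.List.slice l (some 0) (some (pvGB l + 1))
  by_cases hn : l.length ≤ 1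
  · rw [if_pos hn] at hmain
    obtain ⟨h1, h2⟩ := hmain
    rw [h1, h2]
    rw [PySem.List.slice_zero_start, PySem.List.slice_zero_start,
        PySem.List.slice_to _ (by omega), PySem.List.slice_to _ (by omega)]
    simp
    omega
  · rw [if_neg hn] at hmain
    rw [hmain]
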